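-- pv_equiv track=rewrite | github.com/jucikisistok/code-practice | CodeFights/matrixElementsSum.py | matrixElementsSum
-- ===== SOURCE A (Python) =====
-- def matrixElementsSum(matrix):
-- 	"""
-- 	After becoming famous, CodeBots decided to move to a new building and live together.
-- 	The building is represented by a rectangular matrix of rooms, each cell containing an
-- 	integer - the price of the room. Some rooms are free (their cost is 0), but that's
-- 	probably because they are haunted, so all the bots are afraid of them. That is why
-- 	any room that is free or is located anywhere below a free room in the same column is
-- 	not considered suitable for the bots.
--
-- 	Help the bots calculate the total price of all the rooms that are suitable for them.
-- 	"""
--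
-- 	total_price = 0
-- 	for i in range(len(matrix)):
-- 		for j in range(len(matrix[0])):
-- 			if i < len(matrix)-1 and matrix[i][j] == 0:
-- 				#we don't need to look at the last row since
-- 				#there is nothing below
-- 				matrix[i + 1][j] = 0
-- 			total_price = total_price + matrix[i][j]
-- 	return total_price
-- ===== SOURCE B (Python) =====
-- def matrixElementsSum(matrix):
--     if not matrix:
--         return 0
--     total = 0
--     for j in range(len(matrix[0])):
--         for row in matrix:
--             if row[j] == 0:
--                 break
--             total += row[j]
--     return total
-- ===== Notes on version B (the rewrite author's own statement) =====
-- stated objective: alternative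
-- what changed: column-major traversal that breaks at the first zero in each column and never mutates the input, replacing A's row-major pass that propagates zeros downward by mutating the matrix in place
import Mathlib
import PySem

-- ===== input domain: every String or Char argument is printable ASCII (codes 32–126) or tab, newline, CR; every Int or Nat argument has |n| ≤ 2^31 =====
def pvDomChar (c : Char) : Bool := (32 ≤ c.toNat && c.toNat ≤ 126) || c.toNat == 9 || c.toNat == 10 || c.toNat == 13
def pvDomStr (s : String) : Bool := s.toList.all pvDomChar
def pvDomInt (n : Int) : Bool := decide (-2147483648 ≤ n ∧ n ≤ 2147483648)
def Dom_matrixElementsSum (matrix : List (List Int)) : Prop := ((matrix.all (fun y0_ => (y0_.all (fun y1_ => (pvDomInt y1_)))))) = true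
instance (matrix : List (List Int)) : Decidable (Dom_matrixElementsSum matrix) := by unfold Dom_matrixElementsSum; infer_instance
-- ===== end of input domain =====

-- ===== PORT A =====
-- B changes the traversal (column-major with an early break, no mutation) versus A's
-- row-major mutating pass; A mutates its argument in place (zeroing cells below zeros) —
-- the equivalence proved here is about the RETURN value only.
-- Loop body of A's inner `for j in range(len(matrix[0]))`: conditionally zero matrix[i+1][j], then add matrix[i][j].
def pvStepA (nrows i : Nat) (st : List (List Int) × Int) (j : Nat) : List (List Int) × Int :=
  let m := st.1
  -- `if i < len(matrix)-1 and matrix[i][j] == 0: matrix[i+1][j] = 0`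
  let m' := if i < nrows - 1 ∧ (m.getD i []).getD j 0 = 0
            then m.set (i + 1) ((m.getD (i + 1) []).set j 0) else m
  -- `total_price = total_price + matrix[i][j]` (re-read after the possible write, as Python does);
  -- list indexing is `getD`: Pre_ guarantees every index is in range, exactly where Python does not raise
  (m', st.2 + (m'.getD i []).getD j 0)

-- One iteration of A's outer loop: `for j in range(len(matrix[0]))`
def pvRowA (nrows : Nat) (st : List (List Int) × Int) (i : Nat) : List (List Int) × Int :=
  (List.range (st.1.headD []).length).foldl (pvStepA nrows i) st

def matrixElementsSum (matrix : List (List Int)) : Int :=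
  ((List.range matrix.length).foldl (pvRowA matrix.length) (matrix, 0)).2

-- ===== PORT B =====
-- B's inner `for row in matrix: if row[j] == 0: break; total += row[j]`
def pvColSum : List (List Int) → Nat → Int
  | [], _ => 0
  | r :: rs, j => if r.getD j 0 = 0 then 0 else r.getD j 0 + pvColSum rs j

def matrixElementsSum_alt (matrix : List (List Int)) : Int :=
  match matrix with
  | [] => 0
  | r0 :: _ => (List.range r0.length).foldl (fun total j => total + pvColSum matrix j) 0

-- ===== PRECONDITION & SPEC =====
-- Pre_ is exactly where Python A returns: every row at least as long as the first row
-- (a shorter row makes A raise IndexError at `matrix[i][j]` for some j < len(matrix[0])).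
def Pre_matrixElementsSum (matrix : List (List Int)) : Prop :=
  ∀ r ∈ matrix, (matrix.headD []).length ≤ r.length
instance (matrix : List (List Int)) : Decidable (Pre_matrixElementsSum matrix) := by
  unfold Pre_matrixElementsSum; infer_instance
def pvWitness_matrixElementsSum : List (List Int) := [[1, 2], [0, 3]]
def Spec_matrixElementsSum (matrix : List (List Int)) (out : Int) : Prop := out = matrixElementsSum_alt matrix
instance (matrix : List (List Int)) (out : Int) : Decidable (Spec_matrixElementsSum matrix out) := by unfold Spec_matrixElementsSum; infer_instance

-- ===== CLAIM (what is proved, stated in full; the proofs are below) =====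
def Claim_equal_matrixElementsSum : Prop := ∀ (matrix : List (List Int)), Dom_matrixElementsSum matrix → Pre_matrixElementsSum matrix → Spec_matrixElementsSum matrix (matrixElementsSum matrix)

-- ===== LEMMAS AND PROOFS =====

-- The common reference value: per column, zeros "kill" everything below; `pvPropSum`
-- folds row 1 into row 2 (`pvMaskRow`) exactly as A's mutation does.
def pvMask (a b : Int) : Int := if a = 0 then 0 else b

def pvMaskRow (a b : List Int) (n : Nat) : List Int :=
  List.zipWith pvMask (a.take n) (b.take n) ++ b.drop n

def pvRowSum (r : List Int) (c : Nat) : Int := ∑ j ∈ Finset.range c, r.getD j 0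

def pvPropSum (n : Nat) : List (List Int) → Int
  | [] => 0
  | [r] => pvRowSum r n
  | r :: r' :: rs => pvRowSum r n + pvPropSum n (pvMaskRow r r' n :: rs)
  termination_by l => l.length
  decreasing_by simp

-- `pvRowA` with the inner loop bound made explicit (row 0 is never written, so the bound is constant)
def pvRowA' (n nrows : Nat) (st : List (List Int) × Int) (i : Nat) : List (List Int) × Int :=
  (List.range n).foldl (pvStepA nrows i) st

theorem pvMaskRow_zero (a b : List Int) : pvMaskRow a b 0 = b := by
  simp [pvMaskRow]

theorem pvMaskRow_length (a b : List Int) (n : Nat) (ha : n ≤ a.length) (hb : n ≤ b.length) :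
    (pvMaskRow a b n).length = b.length := by
  simp [pvMaskRow]; omega

theorem pvMaskRow_succ (a b : List Int) (j : Nat) (ha : j < a.length) (hb : j < b.length) :
    pvMaskRow a b (j + 1) =
      if a.getD j 0 = 0 then (pvMaskRow a b j).set j 0 else pvMaskRow a b j := by
  have hga : a[j] = a.getD j 0 := by simp [List.getD, List.getElem?_eq_getElem ha]
  have hgb : b[j] = b.getD j 0 := by simp [List.getD, List.getElem?_eq_getElem hb]
  have hta : a.take (j + 1) = a.take j ++ [a.getD j 0] := by
    rw [List.take_add_one, List.getElem?_eq_getElem ha, hga]; rfl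
  have htb : b.take (j + 1) = b.take j ++ [b.getD j 0] := by
    rw [List.take_add_one, List.getElem?_eq_getElem hb, hgb]; rfl
  have hlen : (a.take j).length = (b.take j).length := by simp; omega
  have hdrop : b.drop j = b.getD j 0 :: b.drop (j + 1) := by
    rw [List.drop_eq_getElem_cons hb, hgb]
  have hzlen : (List.zipWith pvMask (a.take j) (b.take j)).length = j := by simp; omega
  unfold pvMaskRow
  rw [hta, htb, List.zipWith_append hlen, hdrop]
  simp only [List.zipWith_cons_cons, List.zipWith_nil_right]
  have hset : ∀ v : Int,
      (List.zipWith pvMask (a.take j) (b.take j) ++ b.getD j 0 :: b.drop (j + 1)).set j v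
        = List.zipWith pvMask (a.take j) (b.take j) ++ v :: b.drop (j + 1) := by
    intro v
    rw [List.set_append, if_neg (by omega), show j - (List.zipWith pvMask (a.take j) (b.take j)).length = 0 from by omega]
    rfl
  by_cases h0 : a.getD j 0 = 0
  · rw [if_pos h0, hset]
    have hm0 : pvMask (a.getD j 0) (b.getD j 0) = 0 := by rw [pvMask, if_pos h0]
    rw [hm0]
    simp
  · rw [if_neg h0]
    have hm0 : pvMask (a.getD j 0) (b.getD j 0) = b.getD j 0 := by rw [pvMask, if_neg h0]
    rw [hm0]
    simp

theorem pvMaskRow_getD (a b : List Int) (n j : Nat) (hj : j < n)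
    (ha : n ≤ a.length) (hb : n ≤ b.length) :
    (pvMaskRow a b n).getD j 0 = pvMask (a.getD j 0) (b.getD j 0) := by
  have hja : j < a.length := hj.trans_le ha
  have hjb : j < b.length := hj.trans_le hb
  have hz : j < (List.zipWith pvMask (a.take n) (b.take n)).length := by simp; omega
  unfold pvMaskRow
  rw [List.getD_append _ _ _ _ hz]
  rw [List.getD, List.getElem?_eq_getElem hz]
  simp [List.getElem_zipWith, List.getElem_take, List.getD,
    List.getElem?_eq_getElem hja, List.getElem?_eq_getElem hjb]

-- closed form of A's inner loop on the LAST row (no write happens)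
theorem pvInner_last (nrows i : Nat) (h : ¬ i < nrows - 1) (c : Nat) :
    ∀ (m : List (List Int)) (t : Int),
      (List.range c).foldl (pvStepA nrows i) (m, t) = (m, t + pvRowSum (m.getD i []) c) := by
  induction c with
  | zero => intro m t; simp [pvRowSum]
  | succ c ih =>
    intro m t
    rw [List.range_succ, List.foldl_append, ih]
    simp only [List.foldl_cons, List.foldl_nil, pvStepA]
    rw [if_neg (by tauto)]
    simp [pvRowSum, Finset.sum_range_succ, add_assoc]

-- closed form of A's inner loop on a non-last row: row i+1 gets masked column by column
theorem pvInner_main (nrows i : Nat) (m : List (List Int)) (hi : i < nrows - 1)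
    (him : i + 1 < m.length) (c : Nat) (hca : c ≤ (m.getD i []).length)
    (hcb : c ≤ (m.getD (i + 1) []).length) (t : Int) :
    (List.range c).foldl (pvStepA nrows i) (m, t) =
      (m.set (i + 1) (pvMaskRow (m.getD i []) (m.getD (i + 1) []) c),
        t + pvRowSum (m.getD i []) c) := by
  induction c with
  | zero =>
    simp only [List.range_zero, List.foldl_nil, pvMaskRow_zero]
    rw [show m.getD (i + 1) [] = m[i + 1] from by simp [List.getD, List.getElem?_eq_getElem him]]
    rw [List.set_getElem_self]
    simp [pvRowSum]
  | succ c ih =>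
    have hca' : c ≤ (m.getD i []).length := by omega
    have hcb' : c ≤ (m.getD (i + 1) []).length := by omega
    rw [List.range_succ, List.foldl_append, ih hca' hcb']
    simp only [List.foldl_cons, List.foldl_nil, pvStepA]
    have hne : i + 1 ≠ i := by omega
    have hgi : ∀ v : List Int, (m.set (i+1) v).getD i [] = m.getD i [] := by
      intro v; simp [List.getD, List.getElem?_set_ne hne]
    have hgi1 : (m.set (i+1) (pvMaskRow (m.getD i []) (m.getD (i+1) []) c)).getD (i+1) []
        = pvMaskRow (m.getD i []) (m.getD (i+1) []) c := by
      simp [List.getD, him]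
    have hmsucc := pvMaskRow_succ (m.getD i []) (m.getD (i+1) []) c (by omega) (by omega)
    by_cases h0 : (m.getD i []).getD c 0 = 0
    · rw [if_pos ⟨hi, by rw [hgi]; exact h0⟩]
      simp only [hgi, hgi1, List.set_set]
      rw [hmsucc, if_pos h0]
      simp [pvRowSum, Finset.sum_range_succ, add_assoc]
    · rw [if_neg (by rw [hgi]; tauto)]
      simp only [hgi, hgi1]
      rw [hmsucc, if_neg h0]
      simp [pvRowSum, Finset.sum_range_succ, add_assoc]

-- the head row is never written by A's loop
theorem pvStepA_headD (nrows i : Nat) (st : List (List Int) × Int) (j : Nat) :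
    ((pvStepA nrows i st j).1).headD [] = st.1.headD [] := by
  rcases st with ⟨m, t⟩
  dsimp only [pvStepA]
  by_cases h : i < nrows - 1 ∧ (m.getD i []).getD j 0 = 0
  · rw [if_pos h]; cases m <;> simp
  · rw [if_neg h]

theorem pvFold_stepA_headD (nrows i : Nat) (js : List Nat) :
    ∀ st : List (List Int) × Int,
      ((js.foldl (pvStepA nrows i) st).1).headD [] = st.1.headD [] := by
  induction js with
  | nil => intro st; rfl
  | cons j js ih => intro st; rw [List.foldl_cons, ih, pvStepA_headD]

theorem pvRowA_eq_rowA' (n nrows : Nat) (idxs : List Nat) :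
    ∀ st : List (List Int) × Int, (st.1.headD []).length = n →
      idxs.foldl (pvRowA nrows) st = idxs.foldl (pvRowA' n nrows) st := by
  induction idxs with
  | nil => intro st _; rfl
  | cons i idxs ih =>
    intro st h
    rw [List.foldl_cons, List.foldl_cons]
    rw [show pvRowA nrows st i = pvRowA' n nrows st i from by rw [pvRowA, h]; rfl]
    exact ih _ (by rw [pvRowA', pvFold_stepA_headD, h])

-- processing row i+1 of (r₀ :: m) is processing row i of m
theorem pvStepA_shift (N i j : Nat) (r₀ : List Int) (m : List (List Int)) (t : Int) :
    pvStepA (N + 1) (i + 1) ((r₀ :: m), t) j =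
      ((r₀ :: (pvStepA N i (m, t) j).1), (pvStepA N i (m, t) j).2) := by
  have hiff : i + 1 < N + 1 - 1 ↔ i < N - 1 := by omega
  simp only [pvStepA, List.getD_cons_succ, List.set_cons_succ]
  by_cases h : i < N - 1 ∧ (m.getD i []).getD j 0 = 0
  · rw [if_pos ⟨hiff.mpr h.1, h.2⟩, if_pos h]
    simp
  · rw [if_neg (by rw [hiff]; tauto), if_neg h]
    simp

theorem pvFold_stepA_shift (N i : Nat) (js : List Nat) :
    ∀ (m : List (List Int)) (r₀ : List Int) (t : Int),
      js.foldl (pvStepA (N + 1) (i + 1)) ((r₀ :: m), t) =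
        ((r₀ :: (js.foldl (pvStepA N i) (m, t)).1), (js.foldl (pvStepA N i) (m, t)).2) := by
  induction js with
  | nil => intro m r₀ t; rfl
  | cons j js ih =>
    intro m r₀ t
    rw [List.foldl_cons, List.foldl_cons, pvStepA_shift]
    rcases h : pvStepA N i (m, t) j with ⟨m', t'⟩
    rw [ih]

theorem pvRowA'_shift (n N i : Nat) (r₀ : List Int) (m : List (List Int)) (t : Int) :
    pvRowA' n (N + 1) ((r₀ :: m), t) (i + 1) =
      ((r₀ :: (pvRowA' n N (m, t) i).1), (pvRowA' n N (m, t) i).2) := by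
  unfold pvRowA'; exact pvFold_stepA_shift N i (List.range n) m r₀ t

theorem pvFold_rowA'_shift (n N : Nat) (js : List Nat) :
    ∀ (m : List (List Int)) (r₀ : List Int) (t : Int),
      js.foldl (fun st i => pvRowA' n (N + 1) st (i + 1)) ((r₀ :: m), t) =
        ((r₀ :: (js.foldl (pvRowA' n N) (m, t)).1), (js.foldl (pvRowA' n N) (m, t)).2) := by
  induction js with
  | nil => intro m r₀ t; rfl
  | cons j js ih =>
    intro m r₀ t
    rw [List.foldl_cons, List.foldl_cons, pvRowA'_shift]
    rcases h : pvRowA' n N (m, t) j with ⟨m', t'⟩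
    rw [ih]

-- A's whole loop computes pvPropSum
theorem pvA_propSum (n : Nat) (m : List (List Int)) :
    (∀ r ∈ m, n ≤ r.length) → ∀ t : Int,
      ((List.range m.length).foldl (pvRowA' n m.length) (m, t)).2 = t + pvPropSum n m := by
  induction m using pvPropSum.induct n with
  | case1 => intro _ t; simp [pvPropSum]
  | case2 r =>
    intro hm t
    have h0 : ¬ (0 : Nat) < 1 - 1 := by simp
    show (List.foldl (pvRowA' n 1) ([r], t) (List.range 1)).2 = t + pvPropSum n [r]
    rw [List.range_one, List.foldl_cons, List.foldl_nil]
    rw [show pvRowA' n 1 ([r], t) 0 = ([r], t + pvRowSum ([r].getD 0 []) n) from by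
      rw [pvRowA']; exact pvInner_last 1 0 h0 n [r] t]
    simp [pvPropSum]
  | case3 r r' rs ih =>
    intro hm t
    have hr : n ≤ r.length := hm r (by simp)
    have hr' : n ≤ r'.length := hm r' (by simp)
    have hlen : (r :: r' :: rs).length = (rs.length + 1) + 1 := by simp
    rw [hlen, List.range_succ_eq_map, List.foldl_cons, List.foldl_map]
    have hfirst : pvRowA' n (rs.length + 1 + 1) ((r :: r' :: rs), t) 0 =
        ((r :: pvMaskRow r r' n :: rs), t + pvRowSum r n) := by
      have := pvInner_main (rs.length + 1 + 1) 0 (r :: r' :: rs) (by simp) (by simp)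
        n (by simpa using hr) (by simpa using hr') t
      simpa [pvRowA'] using this
    rw [hfirst]
    have hshift := pvFold_rowA'_shift n (rs.length + 1) (List.range (rs.length + 1))
      (pvMaskRow r r' n :: rs) r (t + pvRowSum r n)
    have hfun : (fun (st : List (List Int) × Int) (i : Nat) =>
          pvRowA' n (rs.length + 1 + 1) st (Nat.succ i))
        = (fun st i => pvRowA' n (rs.length + 1 + 1) st (i + 1)) := by rfl
    rw [hfun, hshift]
    have hmask : ∀ rr ∈ pvMaskRow r r' n :: rs, n ≤ rr.length := by
      intro rr hrr
      rcases List.mem_cons.mp hrr with h | h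
      · subst h; rw [pvMaskRow_length r r' n hr hr']; exact hr'
      · exact hm rr (by simp [h])
    have := ih hmask (t + pvRowSum r n)
    rw [show (pvMaskRow r r' n :: rs).length = rs.length + 1 from by simp] at this
    rw [this, pvPropSum]
    ring

-- B-side: sum of columns equals pvPropSum
theorem pvFoldSum (f : Nat → Int) (c : Nat) :
    ∀ t0 : Int, (List.range c).foldl (fun t j => t + f j) t0 = t0 + ∑ j ∈ Finset.range c, f j := by
  induction c with
  | zero => intro t0; simp
  | succ c ih =>
    intro t0
    rw [List.range_succ, List.foldl_append, ih]
    simp [Finset.sum_range_succ, add_assoc]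

theorem pvB_propSum (n : Nat) (m : List (List Int)) :
    (∀ r ∈ m, n ≤ r.length) →
      ∑ j ∈ Finset.range n, pvColSum m j = pvPropSum n m := by
  induction m using pvPropSum.induct n with
  | case1 => intro _; simp [pvPropSum, pvColSum]
  | case2 r =>
    intro _
    rw [pvPropSum, pvRowSum]
    apply Finset.sum_congr rfl
    intro j _
    simp only [pvColSum]
    by_cases h : r.getD j 0 = 0
    · rw [if_pos h, h]
    · rw [if_neg h, add_zero]
  | case3 r r' rs ih =>
    intro hm
    have hr : n ≤ r.length := hm r (by simp)
    have hr' : n ≤ r'.length := hm r' (by simp)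
    have hmask : ∀ rr ∈ pvMaskRow r r' n :: rs, n ≤ rr.length := by
      intro rr hrr
      rcases List.mem_cons.mp hrr with h | h
      · subst h; rw [pvMaskRow_length r r' n hr hr']; exact hr'
      · exact hm rr (by simp [h])
    have hpt : ∀ j ∈ Finset.range n,
        pvColSum (r :: r' :: rs) j = r.getD j 0 + pvColSum (pvMaskRow r r' n :: rs) j := by
      intro j hj
      rw [Finset.mem_range] at hj
      have hg := pvMaskRow_getD r r' n j hj hr hr'
      simp only [pvColSum]
      by_cases h0 : r.getD j 0 = 0
      · have hmz : (pvMaskRow r r' n).getD j 0 = 0 := by rw [hg, pvMask, if_pos h0]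
        rw [if_pos h0, hmz, if_pos rfl, h0, add_zero]
      · have hmz : (pvMaskRow r r' n).getD j 0 = r'.getD j 0 := by rw [hg, pvMask, if_neg h0]
        rw [if_neg h0, hmz]
    rw [Finset.sum_congr rfl hpt, Finset.sum_add_distrib, ih hmask, pvPropSum, pvRowSum]

-- ===== VERDICT (by name: the statement is the Claim_ definition above) =====
theorem matrixElementsSum_spec : Claim_equal_matrixElementsSum := by
  intro matrix _ hpre
  unfold Spec_matrixElementsSum
  have hA : matrixElementsSum matrix = pvPropSum ((matrix.headD []).length) matrix := by
    unfold matrixElementsSum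
    rw [pvRowA_eq_rowA' ((matrix.headD []).length) matrix.length (List.range matrix.length)
      (matrix, 0) rfl]
    rw [pvA_propSum ((matrix.headD []).length) matrix hpre 0]
    ring
  have hB : matrixElementsSum_alt matrix = pvPropSum ((matrix.headD []).length) matrix := by
    unfold matrixElementsSum_alt
    cases matrix with
    | nil => simp [pvPropSum]
    | cons r0 rest =>
      show (List.range r0.length).foldl (fun total j => total + pvColSum (r0 :: rest) j) 0 = _
      rw [pvFoldSum (fun j => pvColSum (r0 :: rest) j) r0.length 0, zero_add]
      exact pvB_propSum r0.length (r0 :: rest) hpre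
  rw [hA, hB]
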